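-- pv_equiv track=rewrite | github.com/jessica-schofield/march-madness-bot | slack_bot/messages.py | format_leaderboard
-- ===== SOURCE A (Python) =====
-- def format_leaderboard(entries):
--     if not entries:
--         return "_No data yet_"
--     lines = []
--     rank = 1
--     prev_pts = None
--     for i, e in enumerate(entries):
--         curr_pts = e.split("(")[-1].rstrip(")")
--         if prev_pts is not None and curr_pts != prev_pts:
--             rank = i + 1
--         lines.append(f"{rank}. {e}")
--         prev_pts = curr_pts
--     return "\n".join(lines)
-- ===== SOURCE B (Python) =====
-- def _key(e):
--     return e.split("(")[-1].rstrip(")")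
--
--
-- def format_leaderboard(entries):
--     if not entries:
--         return "_No data yet_"
--     lines = []
--     n = len(entries)
--     start = 0
--     while start < n:
--         # maximal run of entries sharing the start entry's points key
--         k = _key(entries[start])
--         end = start + 1
--         while end < n and _key(entries[end]) == k:
--             end += 1
--         lines.extend(f"{start + 1}. {entries[j]}" for j in range(start, end))
--         start = end
--     return "\n".join(lines)
-- ===== Notes on version B (the rewrite author's own statement) =====
-- stated objective: alternative
-- what changed: Replaces A's per-element enumerate loop with prev_pts/rank state by slicing the list into maximal runs of equal points keys and numbering each run by its absolute start index.
import Mathlib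
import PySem

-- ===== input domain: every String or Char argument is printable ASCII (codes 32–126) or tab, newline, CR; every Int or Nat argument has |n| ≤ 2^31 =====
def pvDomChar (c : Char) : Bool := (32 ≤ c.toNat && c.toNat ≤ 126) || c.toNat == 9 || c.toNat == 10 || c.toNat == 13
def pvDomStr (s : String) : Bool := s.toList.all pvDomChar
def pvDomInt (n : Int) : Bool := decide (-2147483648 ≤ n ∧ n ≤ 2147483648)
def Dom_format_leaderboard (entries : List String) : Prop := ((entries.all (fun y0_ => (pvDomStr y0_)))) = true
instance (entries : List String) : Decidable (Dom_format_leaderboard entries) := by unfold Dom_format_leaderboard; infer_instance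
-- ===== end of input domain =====

-- B replaces A's per-element prev-points/rank bookkeeping by slicing the list into maximal
-- runs of equal points keys, numbering each run by its absolute start index (objective: alternative).

-- shared key helper (identical expression in both Python sources): e.split("(")[-1].rstrip(")")
-- rstrip(")") is ported by hand: drop trailing ')' characters — exact, since the chars set is {')'}
def fl_key (e : String) : List Char :=
  (((PySem.List.pyGet? (PySem.Chars.splitOn e.toList ['(']) (-1)).getD []).reverse.dropWhile
      (fun c => c = ')')).reverse

-- f"{rank}. {e}" built over List Char (String.append is opaque to the kernel)
def fl_line (rank : Int) (e : String) : String :=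
  String.ofList ((PySem.Int.toStr rank).toList ++ (". ").toList ++ e.toList)

-- enumerate(entries) (helper also reused, generalized over the start index, by the proofs below)
def fl_enumFrom (i : Nat) : List String → List (Nat × String)
  | [] => []
  | e :: rest => (i, e) :: fl_enumFrom (i + 1) rest

-- ===== PORT A =====
-- A's for-loop over enumerate(entries), state (lines, rank, prev_pts)
def fl_loop : List (Nat × String) → List String → Int → Option (List Char) → List String
  | [], lines, _, _ => lines
  | (i, e) :: rest, lines, rank, prev =>
      let curr := fl_key e
      let rank' := match prev with
        | none => rank
        | some p => if curr ≠ p then (i : Int) + 1 else rank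
      fl_loop rest (lines ++ [fl_line rank' e]) rank' (some curr)

def format_leaderboard (entries : List String) : String :=
  if entries = [] then "_No data yet_"
  else PySem.Str.join "\n" (fl_loop (fl_enumFrom 0 entries) [] 1 none)

-- ===== PORT B =====
-- B's outer while loop: split off the maximal run of entries sharing the head's key
-- (inner while counting run_len = takeWhile; rest[run_len:] = dropWhile), rank = start + 1
def fl_lines : List String → Int → List String
  | [], _ => []
  | e :: rest, start =>
      let k := fl_key e
      let run := e :: rest.takeWhile (fun x => fl_key x = k)
      let rest' := rest.dropWhile (fun x => fl_key x = k)
      run.map (fl_line (start + 1)) ++ fl_lines rest' (start + run.length)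
  termination_by entries _ => entries.length
  decreasing_by
    simp only [List.length_cons]
    exact Nat.lt_succ_of_le (List.length_dropWhile_le _ _)

def format_leaderboard_alt (entries : List String) : String :=
  if entries = [] then "_No data yet_"
  else PySem.Str.join "\n" (fl_lines entries 0)

-- ===== PRECONDITION & SPEC =====
def Spec_format_leaderboard (entries : List String) (out : String) : Prop := out = format_leaderboard_alt entries
instance (entries : List String) (out : String) : Decidable (Spec_format_leaderboard entries out) := by unfold Spec_format_leaderboard; infer_instance

-- ===== CLAIM (what is proved, stated in full; the proofs are below) =====
def Claim_equal_format_leaderboard : Prop := ∀ (entries : List String), Dom_format_leaderboard entries → Spec_format_leaderboard entries (format_leaderboard entries)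

-- ===== LEMMAS AND PROOFS =====

-- accumulator lemma for A's loop
theorem fl_loop_acc (l : List (Nat × String)) (lines : List String) (rank : Int)
    (prev : Option (List Char)) :
    fl_loop l lines rank prev = lines ++ fl_loop l [] rank prev := by
  induction l generalizing lines rank prev with
  | nil => simp [fl_loop]
  | cons p rest ih =>
      obtain ⟨i, e⟩ := p
      simp only [fl_loop]
      rw [ih (lines ++ _), ih ([] ++ _)]
      simp

-- A's loop on a run tail with prev = some k: entries whose key equals k keep rank r;
-- the first differing key at absolute index j' starts a fresh run (handled by `ih`).
-- Main lemma, by strong induction on length: at a run start (prev = none with rank = i+1,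
-- or prev = some k with k ≠ key of head) A's loop from index i equals B's run decomposition.
theorem fl_main : ∀ n (entries : List String), entries.length ≤ n →
    ∀ (i : Nat) (rank : Int) (prev : Option (List Char)),
    (match entries, prev with
      | [], _ => True
      | _ :: _, none => rank = (i : Int) + 1
      | e :: _, some k => k ≠ fl_key e) →
    fl_loop (fl_enumFrom i entries) [] rank prev = fl_lines entries (i : Int) := by
  intro n
  induction n with
  | zero =>
      intro entries hlen i rank prev _
      interval_cases h : entries.length
      rw [List.length_eq_zero_iff] at h
      subst h
      simp [fl_loop, fl_lines, fl_enumFrom]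
  | succ n ih =>
      intro entries hlen i rank prev hpre
      match entries with
      | [] => simp [fl_loop, fl_lines, fl_enumFrom]
      | e :: rest =>
        have hrest : rest.length ≤ n := by
          simpa [Nat.succ_le_succ_iff] using hlen
        -- the rest of the run, processed against B's takeWhile/dropWhile decomposition
        have inner : ∀ (xs : List String) (j : Nat), xs.length ≤ n → ∀ (r : Int),
            fl_loop (fl_enumFrom j xs) [] r (some (fl_key e)) =
              (xs.takeWhile (fun x => fl_key x = fl_key e)).map (fl_line r) ++
                fl_lines (xs.dropWhile (fun x => fl_key x = fl_key e))
                  ((j : Int) + ((xs.takeWhile (fun x => fl_key x = fl_key e)).length : Int)) := by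
          intro xs
          induction xs with
          | nil => intro j _ r; simp [fl_loop, fl_lines, fl_enumFrom]
          | cons x xs ihrun =>
              intro j hle r
              by_cases hx : fl_key x = fl_key e
              · simp only [fl_enumFrom, fl_loop, hx, ne_eq, not_true_eq_false, if_false,
                  List.takeWhile_cons, List.dropWhile_cons, decide_eq_true_eq,
                  List.map_cons, List.length_cons, reduceIte]
                rw [fl_loop_acc, ihrun (j + 1) (Nat.le_of_succ_le hle) r]
                simp only [List.nil_append, List.cons_append, List.cons.injEq, true_and]
                congr 2
                push_cast
                ring
              · simp only [fl_enumFrom, fl_loop, List.takeWhile_cons, List.dropWhile_cons,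
                  decide_eq_true_eq, if_neg hx, List.map_nil, List.length_nil]
                have := ih (x :: xs) hle j r (some (fl_key e))
                  (by simpa using fun h => hx h.symm)
                simp only [fl_enumFrom] at this
                simp only [fl_loop] at this ⊢
                rw [this]
                simp
        -- first element of the run gets rank i + 1 in both prev cases; tail via `inner`
        have fin : fl_loop (fl_enumFrom (i + 1) rest) ([] ++ [fl_line ((i : Int) + 1) e])
            ((i : Int) + 1) (some (fl_key e)) = fl_lines (e :: rest) (i : Int) := by
          rw [fl_loop_acc, fl_lines]
          simp only [List.map_cons, List.cons_append, List.nil_append, List.length_cons]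
          rw [inner rest (i + 1) hrest ((i : Int) + 1)]
          congr 2
          push_cast
          ring_nf
        cases prev with
        | none =>
            have hr : rank = (i : Int) + 1 := by simpa using hpre
            subst hr
            simpa only [fl_enumFrom, fl_loop] using fin
        | some k =>
            have hk : fl_key e ≠ k := fun h => hpre h.symm
            simp only [fl_enumFrom, fl_loop, if_pos hk]
            exact fin

-- ===== VERDICT (by name: the statement is the Claim_ definition above) =====
theorem format_leaderboard_spec : Claim_equal_format_leaderboard := by
  intro entries _
  unfold Spec_format_leaderboard format_leaderboard format_leaderboard_alt
  split
  · rfl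
  · congr 1
    have := fl_main entries.length entries le_rfl 0 1 none
      (by cases entries with | nil => trivial | cons e rest => simp)
    simpa using this
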